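-- pv_equiv track=rewrite | github.com/openai/parameter-golf | records/track_non_record_16mb/2026-03-27_Conker5_TandemResidual_MLX/conker5/conker4b.py | _delimiter_subtype
-- ===== SOURCE A (Python) =====
-- DELIM_NONE = 0
--
-- DELIM_BRACKET = 1
--
-- DELIM_QUOTE = 2
--
-- DELIM_SENTENCE = 3
--
-- DELIM_PATH = 4
--
-- DELIM_OPERATOR = 5
--
-- def _delimiter_subtype(core: str) -> int:
--     if not core:
--         return DELIM_NONE
--     if all(ch in "()[]{}<>" for ch in core):
--         return DELIM_BRACKET
--     if all(ch in "\"'`" for ch in core):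
--         return DELIM_QUOTE
--     if all(ch in ".,;:!?" for ch in core):
--         return DELIM_SENTENCE
--     if all(ch in "/\\\\_-" for ch in core):
--         return DELIM_PATH
--     if all(ch in "=+*&^%$#@~|" for ch in core):
--         return DELIM_OPERATOR
--     return DELIM_NONE
-- ===== SOURCE B (Python) =====
-- DELIM_NONE = 0
-- DELIM_BRACKET = 1
-- DELIM_QUOTE = 2
-- DELIM_SENTENCE = 3
-- DELIM_PATH = 4
-- DELIM_OPERATOR = 5
--
-- # One literal table mapping each delimiter character to its (unique) class code.
-- # The five charsets are disjoint, so a string belongs to a class iff every one of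
-- # its characters maps to that same nonzero code.
-- _CLASS = {
--     '(': 1, ')': 1, '[': 1, ']': 1, '{': 1, '}': 1, '<': 1, '>': 1,
--     '"': 2, "'": 2, '`': 2,
--     '.': 3, ',': 3, ';': 3, ':': 3, '!': 3, '?': 3,
--     '/': 4, '\\': 4, '_': 4, '-': 4,
--     '=': 5, '+': 5, '*': 5, '&': 5, '^': 5, '%': 5, '$': 5, '#': 5, '@': 5, '~': 5, '|': 5,
-- }
--
-- def _delimiter_subtype(core: str) -> int:
--     if not core:
--         return DELIM_NONE
--     first = _CLASS.get(core[0], DELIM_NONE)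
--     if first == DELIM_NONE:
--         return DELIM_NONE
--     for ch in core[1:]:
--         if _CLASS.get(ch, DELIM_NONE) != first:
--             return DELIM_NONE
--     return first
-- ===== Notes on version B (the rewrite author's own statement) =====
-- stated objective: alternative
-- what changed: B inverts the classification: instead of A's five separate full scans of the string (one per charset in an if-chain), it maps each character through a single char-to-class-code table and makes one pass checking that every character carries the same nonzero code as the first character; this is correct because the five charsets are disjoint.
import Mathlib
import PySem

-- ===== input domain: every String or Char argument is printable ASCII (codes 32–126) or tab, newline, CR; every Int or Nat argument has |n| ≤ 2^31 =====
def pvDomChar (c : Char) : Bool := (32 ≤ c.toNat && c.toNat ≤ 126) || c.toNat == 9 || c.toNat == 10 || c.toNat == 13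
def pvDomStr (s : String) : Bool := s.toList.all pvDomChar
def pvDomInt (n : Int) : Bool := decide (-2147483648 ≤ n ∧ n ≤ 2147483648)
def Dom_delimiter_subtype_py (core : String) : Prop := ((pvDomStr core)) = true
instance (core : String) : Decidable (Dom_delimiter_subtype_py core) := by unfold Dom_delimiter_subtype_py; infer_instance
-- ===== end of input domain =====

-- B replaces A's five full scans (one per charset) by one char→class-code table and a single
-- pass checking every character carries the first character's nonzero code (charsets are disjoint).


set_option maxRecDepth 4000

-- ===== PORT A =====
def delimiter_subtype_py (core : String) : Int :=
  if core.toList = [] then 0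
  else if core.toList.all (fun ch => "()[]{}<>".toList.contains ch) then 1
  else if core.toList.all (fun ch => "\"'`".toList.contains ch) then 2
  else if core.toList.all (fun ch => ".,;:!?".toList.contains ch) then 3
  else if core.toList.all (fun ch => "/\\_-".toList.contains ch) then 4
  else if core.toList.all (fun ch => "=+*&^%$#@~|".toList.contains ch) then 5
  else 0

-- ===== PORT B =====
-- the literal _CLASS table (dict → insertion-ordered association list)
def pvClassDict : PySem.Dict Char Int := PySem.Dict.mk
  [('(',1),(')',1),('[',1),(']',1),('{',1),('}',1),('<',1),('>',1),
   ('"',2),('\'',2),('`',2),('.',3),(',',3),(';',3),(':',3),('!',3),('?',3),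
   ('/',4),('\\',4),('_',4),('-',4),
   ('=',5),('+',5),('*',5),('&',5),('^',5),('%',5),('$',5),('#',5),('@',5),('~',5),('|',5)]

-- _CLASS.get(ch, DELIM_NONE)
def pvGc (c : Char) : Int := pvClassDict.getD c 0

-- the for-loop over core[1:]: bail out with 0 on the first character whose code differs
def pvLoop (first : Int) : List Char → Int
  | [] => first
  | c :: r => if (pvGc c == first) = false then 0 else pvLoop first r

def delimiter_subtype_py_alt (core : String) : Int :=
  match core.toList with
  | [] => 0
  | h :: t =>
      let first := pvGc h
      if first = 0 then 0 else pvLoop first t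

-- ===== PRECONDITION & SPEC =====
def Spec_delimiter_subtype_py (core : String) (out : Int) : Prop := out = delimiter_subtype_py_alt core
instance (core : String) (out : Int) : Decidable (Spec_delimiter_subtype_py core out) := by unfold Spec_delimiter_subtype_py; infer_instance

-- ===== CLAIM (what is proved, stated in full; the proofs are below) =====
def Claim_equal_delimiter_subtype_py : Prop := ∀ (core : String), Dom_delimiter_subtype_py core → Spec_delimiter_subtype_py core (delimiter_subtype_py core)

-- ===== LEMMAS AND PROOFS =====

-- the charsets and the key list as plain char-list literals
def pvCs1 : List Char := ['(',')','[',']','{','}','<','>']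
def pvCs2 : List Char := ['"','\'','`']
def pvCs3 : List Char := ['.',',',';',':','!','?']
def pvCs4 : List Char := ['/','\\','_','-']
def pvCs5 : List Char := ['=','+','*','&','^','%','$','#','@','~','|']
def pvKeysList : List Char := pvCs1 ++ pvCs2 ++ pvCs3 ++ pvCs4 ++ pvCs5

theorem pvS1 : "()[]{}<>".toList = pvCs1 := by decide
theorem pvS2 : "\"'`".toList = pvCs2 := by decide
theorem pvS3 : ".,;:!?".toList = pvCs3 := by decide
theorem pvS4 : "/\\_-".toList = pvCs4 := by decide
theorem pvS5 : "=+*&^%$#@~|".toList = pvCs5 := by decide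

-- table facts (by evaluation of the literal table, character by character)
theorem pvGc_mem1 : ∀ c ∈ pvCs1, pvGc c = 1 := by
  intro c hc
  simp only [pvCs1, List.mem_cons, List.not_mem_nil, or_false] at hc
  rcases hc with rfl|rfl|rfl|rfl|rfl|rfl|rfl|rfl <;>
    simp only [pvGc, pvClassDict, PySem.Dict.getD, PySem.Dict.get?_mk_cons, Char.reduceBEq,
      if_true, if_false, Bool.false_eq_true, Option.getD_some]
theorem pvGc_mem2 : ∀ c ∈ pvCs2, pvGc c = 2 := by
  intro c hc
  simp only [pvCs2, List.mem_cons, List.not_mem_nil, or_false] at hc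
  rcases hc with rfl|rfl|rfl <;>
    simp only [pvGc, pvClassDict, PySem.Dict.getD, PySem.Dict.get?_mk_cons, Char.reduceBEq,
      if_true, if_false, Bool.false_eq_true, Option.getD_some]
theorem pvGc_mem3 : ∀ c ∈ pvCs3, pvGc c = 3 := by
  intro c hc
  simp only [pvCs3, List.mem_cons, List.not_mem_nil, or_false] at hc
  rcases hc with rfl|rfl|rfl|rfl|rfl|rfl <;>
    simp only [pvGc, pvClassDict, PySem.Dict.getD, PySem.Dict.get?_mk_cons, Char.reduceBEq,
      if_true, if_false, Bool.false_eq_true, Option.getD_some]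
theorem pvGc_mem4 : ∀ c ∈ pvCs4, pvGc c = 4 := by
  intro c hc
  simp only [pvCs4, List.mem_cons, List.not_mem_nil, or_false] at hc
  rcases hc with rfl|rfl|rfl|rfl <;>
    simp only [pvGc, pvClassDict, PySem.Dict.getD, PySem.Dict.get?_mk_cons, Char.reduceBEq,
      if_true, if_false, Bool.false_eq_true, Option.getD_some]
theorem pvGc_mem5 : ∀ c ∈ pvCs5, pvGc c = 5 := by
  intro c hc
  simp only [pvCs5, List.mem_cons, List.not_mem_nil, or_false] at hc
  rcases hc with rfl|rfl|rfl|rfl|rfl|rfl|rfl|rfl|rfl|rfl|rfl <;>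
    simp only [pvGc, pvClassDict, PySem.Dict.getD, PySem.Dict.get?_mk_cons, Char.reduceBEq,
      if_true, if_false, Bool.false_eq_true, Option.getD_some]

theorem pvKeys : pvClassDict.keys = pvKeysList := by
  simp [pvClassDict, pvKeysList, pvCs1, pvCs2, pvCs3, pvCs4, pvCs5, PySem.Dict.keys]

-- every key belongs to one of the five charsets (the key list IS their concatenation)
theorem pvCover : ∀ c ∈ pvKeysList,
    c ∈ pvCs1 ∨ c ∈ pvCs2 ∨ c ∈ pvCs3 ∨ c ∈ pvCs4 ∨ c ∈ pvCs5 := by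
  intro c hc
  simpa [pvKeysList, List.mem_append, or_assoc] using hc

theorem pvGc_notmem (c : Char) (h : c ∉ pvKeysList) : pvGc c = 0 := by
  apply PySem.Dict.getD_of_not_contains
  rw [PySem.Dict.contains_eq_decide_mem_keys, pvKeys]
  simpa using h

-- pvGc only takes the six values 0..5
theorem pvGc_range (c : Char) :
    pvGc c = 0 ∨ pvGc c = 1 ∨ pvGc c = 2 ∨ pvGc c = 3 ∨ pvGc c = 4 ∨ pvGc c = 5 := by
  by_cases h : c ∈ pvKeysList
  · rcases pvCover c h with h1 | h2 | h3 | h4 | h5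
    · exact Or.inr (Or.inl (pvGc_mem1 c h1))
    · exact Or.inr (Or.inr (Or.inl (pvGc_mem2 c h2)))
    · exact Or.inr (Or.inr (Or.inr (Or.inl (pvGc_mem3 c h3))))
    · exact Or.inr (Or.inr (Or.inr (Or.inr (Or.inl (pvGc_mem4 c h4)))))
    · exact Or.inr (Or.inr (Or.inr (Or.inr (Or.inr (pvGc_mem5 c h5)))))
  · exact Or.inl (pvGc_notmem c h)

-- the only keys with code k are the k-th charset's (disjointness, via the mem lemmas)
theorem pvOnly1 : ∀ c ∈ pvKeysList, pvGc c = 1 → c ∈ pvCs1 := by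
  intro c hc hk
  rcases pvCover c hc with h|h|h|h|h
  · exact h
  · rw [pvGc_mem2 c h] at hk; omega
  · rw [pvGc_mem3 c h] at hk; omega
  · rw [pvGc_mem4 c h] at hk; omega
  · rw [pvGc_mem5 c h] at hk; omega
theorem pvOnly2 : ∀ c ∈ pvKeysList, pvGc c = 2 → c ∈ pvCs2 := by
  intro c hc hk
  rcases pvCover c hc with h|h|h|h|h
  · rw [pvGc_mem1 c h] at hk; omega
  · exact h
  · rw [pvGc_mem3 c h] at hk; omega
  · rw [pvGc_mem4 c h] at hk; omega
  · rw [pvGc_mem5 c h] at hk; omega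
theorem pvOnly3 : ∀ c ∈ pvKeysList, pvGc c = 3 → c ∈ pvCs3 := by
  intro c hc hk
  rcases pvCover c hc with h|h|h|h|h
  · rw [pvGc_mem1 c h] at hk; omega
  · rw [pvGc_mem2 c h] at hk; omega
  · exact h
  · rw [pvGc_mem4 c h] at hk; omega
  · rw [pvGc_mem5 c h] at hk; omega
theorem pvOnly4 : ∀ c ∈ pvKeysList, pvGc c = 4 → c ∈ pvCs4 := by
  intro c hc hk
  rcases pvCover c hc with h|h|h|h|h
  · rw [pvGc_mem1 c h] at hk; omega
  · rw [pvGc_mem2 c h] at hk; omega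
  · rw [pvGc_mem3 c h] at hk; omega
  · exact h
  · rw [pvGc_mem5 c h] at hk; omega
theorem pvOnly5 : ∀ c ∈ pvKeysList, pvGc c = 5 → c ∈ pvCs5 := by
  intro c hc hk
  rcases pvCover c hc with h|h|h|h|h
  · rw [pvGc_mem1 c h] at hk; omega
  · rw [pvGc_mem2 c h] at hk; omega
  · rw [pvGc_mem3 c h] at hk; omega
  · rw [pvGc_mem4 c h] at hk; omega
  · exact h

-- membership in charset k ↔ class code k (pointwise; uses disjointness via pvOnly_k)
theorem pv_contains_eq (cs : List Char) (k : Int)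
    (hmem : ∀ c ∈ cs, pvGc c = k)
    (honly : ∀ c ∈ pvKeysList, pvGc c = k → c ∈ cs)
    (hne : k ≠ 0)
    (c : Char) : cs.contains c = (pvGc c == k) := by
  by_cases h : c ∈ cs
  · simp [h, hmem c h]
  · have hgk : pvGc c ≠ k := by
      intro he
      by_cases hall : c ∈ pvKeysList
      · exact h (honly c hall he)
      · exact hne (by rw [← he, pvGc_notmem c hall])
    simp [h, hgk]

-- loop ≡ "all characters have code first"
theorem pvLoop_eq (first : Int) (t : List Char) :
    pvLoop first t = if t.all (fun c => pvGc c == first) then first else 0 := by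
  induction t with
  | nil => simp [pvLoop]
  | cons c r ih =>
      by_cases h : (pvGc c == first) = false
      · simp [pvLoop, h, List.all_cons]
      · simp only [Bool.not_eq_false] at h
        simp [pvLoop, h, List.all_cons, ih]

-- ===== VERDICT (by name: the statement is the Claim_ definition above) =====
theorem delimiter_subtype_py_spec : Claim_equal_delimiter_subtype_py := by
  intro core _
  have e1 := pv_contains_eq pvCs1 1 pvGc_mem1 pvOnly1 (by decide)
  have e2 := pv_contains_eq pvCs2 2 pvGc_mem2 pvOnly2 (by decide)
  have e3 := pv_contains_eq pvCs3 3 pvGc_mem3 pvOnly3 (by decide)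
  have e4 := pv_contains_eq pvCs4 4 pvGc_mem4 pvOnly4 (by decide)
  have e5 := pv_contains_eq pvCs5 5 pvGc_mem5 pvOnly5 (by decide)
  unfold Spec_delimiter_subtype_py delimiter_subtype_py delimiter_subtype_py_alt
  simp only [pvS1, pvS2, pvS3, pvS4, pvS5, e1, e2, e3, e4, e5]
  cases hL : core.toList with
  | nil => simp
  | cons h t =>
      simp only [List.all_cons, pvLoop_eq, reduceCtorEq, if_false]
      rcases pvGc_range h with h' | h' | h' | h' | h' | h' <;>
        simp only [h', Int.reduceBEq, Int.reduceEq, Bool.false_and, Bool.true_and,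
          Bool.false_eq_true, if_false, if_true]
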